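-- pv_equiv track=rewrite | github.com/artkpv/code-dojo | hackerrank.com/challenges/larrys-array/pr.py | cansort
-- ===== SOURCE A (Python) =====
-- def cansort(a):
--     for i in range(len(a)):
--         min_ = min(a[i:])
--         if a[i] == min_:
--             continue
--         for j in range(i+1, len(a)):
--             if a[j] == min_:
--                 break
--         assert(i < j)
--         while j != i:
--             if j - i == 1:
--                 if j + 1 >= len(a):
--                     return False
--                 a[j-1], a[j], a[j+1] = a[j], a[j+1], a[j-1]
--                 j -= 1
--             else:
--                 a[j-2], a[j-1], a[j] = a[j], a[j-2], a[j-1]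
--                 j -= 2
--     return True
-- ===== SOURCE B (Python) =====
-- def cansort(a):
--     b = list(a)
--     n = len(b)
--     for i in range(n):
--         m = min(b[i:])
--         j = b.index(m, i)
--         if j == i:
--             continue
--         b[i:j + 1] = [m] + b[i:j]
--         if (j - i) % 2 == 1:
--             if i + 2 >= n:
--                 return False
--             b[i + 1], b[i + 2] = b[i + 2], b[i + 1]
--     return True
-- ===== Notes on version B (the rewrite author's own statement) =====
-- stated objective: alternative
-- what changed: A moves each suffix-minimum into place by simulating a chain of in-place 3-element rotations (an inner while-loop of rotations plus an inner scan-with-break for the minimum's index); B replaces the whole rotation chain by its net effect computed at once: one slice re-insertion of the minimum plus a single conditional swap of the two following elements when the gap is odd. A mutates its argument in place; B does not (equivalence is about the return value).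
import Mathlib
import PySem

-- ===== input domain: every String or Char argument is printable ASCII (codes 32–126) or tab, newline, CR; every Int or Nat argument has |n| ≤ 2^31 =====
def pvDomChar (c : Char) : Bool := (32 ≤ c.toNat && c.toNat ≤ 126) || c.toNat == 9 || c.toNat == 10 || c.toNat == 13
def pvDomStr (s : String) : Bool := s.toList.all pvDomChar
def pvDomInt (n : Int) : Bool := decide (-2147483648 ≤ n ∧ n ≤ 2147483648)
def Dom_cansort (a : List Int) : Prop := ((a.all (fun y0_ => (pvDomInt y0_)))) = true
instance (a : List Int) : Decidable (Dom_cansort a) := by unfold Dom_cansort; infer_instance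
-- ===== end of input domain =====

-- B replaces A's inner chain of in-place 3-rotations by its net effect (one slice
-- re-insertion of the suffix minimum plus one conditional swap): an alternative
-- decomposition of the same O(n^2) simulation.  A mutates its argument in place;
-- the equivalence proved here is about the return value only.


-- ===== PORT A =====
-- inner `for j in range(i+1, len(a)): if a[j] == min_: break` — scans upward from
-- `j`, stops at the first index holding `m`; Python's leftover value `len(a)-1` when
-- nothing matches (unreachable when a[i] ≠ min) is reproduced.
def pvFindJGo (l : List Int) (m : Int) : Nat → Nat → Nat
  | _, 0 => l.length - 1                                   -- loop fell through: Python's leftover j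
  | j, f + 1 => if l.getD j 0 = m then j else pvFindJGo l m (j + 1) f

def pvFindJ (l : List Int) (j : Nat) (m : Int) : Nat :=
  pvFindJGo l m j (l.length - j)

-- the `while j != i` rotation loop of A, recursion on the gap g = j - i.
-- All indices touched are in range (guarded), so `List.getD _ 0` is exactly Python's
-- indexing; `none` is A's `return False`.
def pvRotDown (l : List Int) (i g : Nat) : Option (List Int) :=
  match g with
  | 0 => some l
  | 1 =>
    -- j - i == 1: a[j-1],a[j],a[j+1] = a[j],a[j+1],a[j-1]  (RHS read before writes)
    if i + 2 ≥ l.length then none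
    else
      let x := l.getD i 0
      let y := l.getD (i + 1) 0
      let z := l.getD (i + 2) 0
      some (((l.set i y).set (i + 1) z).set (i + 2) x)
  | g + 2 =>
    -- a[j-2],a[j-1],a[j] = a[j],a[j-2],a[j-1]; j -= 2
    let j := i + g + 2
    let x := l.getD (j - 2) 0
    let y := l.getD (j - 1) 0
    let z := l.getD j 0
    pvRotDown (((l.set (j - 2) z).set (j - 1) x).set j y) i g

-- the outer `for i in range(len(a))`, k = number of remaining iterations
def pvLoopA (l : List Int) (k : Nat) : Bool :=
  match k with
  | 0 => true
  | k + 1 =>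
    let i := l.length - (k + 1)
    let m := (PySem.List.min? (l.drop i) (fun x => x)).getD 0   -- min(a[i:]), suffix nonempty
    if l.getD i 0 = m then pvLoopA l k
    else
      let j := pvFindJ l (i + 1) m
      match pvRotDown l i (j - i) with
      | none => false
      | some l' => pvLoopA l' k

def cansort (a : List Int) : Bool := pvLoopA a a.length

-- ===== PORT B =====
-- b[i:j+1] = [m] + b[i:j] then an optional swap of b[i+1], b[i+2]; slices with
-- 0 ≤ i ≤ j ≤ len are exactly take/drop.
def pvLoopB (b : List Int) (k : Nat) : Bool :=
  match k with
  | 0 => true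
  | k + 1 =>
    let n := b.length
    let i := n - (k + 1)
    let m := (PySem.List.min? (b.drop i) (fun x => x)).getD 0   -- min(b[i:])
    let j := i + ((PySem.List.index? (b.drop i) m).getD 0)      -- b.index(m, i), always found
    if j = i then pvLoopB b k
    else
      let c := b.take i ++ m :: ((b.drop i).take (j - i) ++ b.drop (j + 1))
      if (j - i) % 2 = 1 then
        if i + 2 ≥ n then false
        else
          let u := c.getD (i + 1) 0
          let v := c.getD (i + 2) 0
          pvLoopB ((c.set (i + 1) v).set (i + 2) u) k
      else pvLoopB c k

def cansort_alt (a : List Int) : Bool := pvLoopB a a.length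

-- ===== PRECONDITION & SPEC =====
def Spec_cansort (a : List Int) (out : Bool) : Prop := out = cansort_alt a
instance (a : List Int) (out : Bool) : Decidable (Spec_cansort a out) := by unfold Spec_cansort; infer_instance

-- ===== CLAIM (what is proved, stated in full; the proofs are below) =====
def Claim_equal_cansort : Prop := ∀ (a : List Int), Dom_cansort a → Spec_cansort a (cansort a)

-- ===== LEMMAS AND PROOFS =====

-- net effect of moving the element at j to position i, the in-between shifting right
def pvCyc (l : List Int) (i j : Nat) : List Int :=
  l.take i ++ l.getD j 0 :: ((l.drop i).take (j - i) ++ l.drop (j + 1))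

def pvSwap2 (c : List Int) (i : Nat) : List Int :=
  (c.set (i + 1) (c.getD (i + 2) 0)).set (i + 2) (c.getD (i + 1) 0)

lemma pvGetD_set (l : List Int) (p k : Nat) (v : Int) :
    (l.set p v).getD k 0 = if k = p ∧ k < l.length then v else l.getD k 0 := by
  simp only [List.getD_eq_getElem?_getD, List.getElem?_set]
  split_ifs with h1 h2 h3 h3 <;> simp_all <;> omega

lemma pvEq_of_getD (l₁ l₂ : List Int) (hlen : l₁.length = l₂.length)
    (h : ∀ k, l₁.getD k 0 = l₂.getD k 0) : l₁ = l₂ := by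
  apply List.ext_getElem hlen
  intro k hk1 hk2
  have := h k
  rwa [List.getD_eq_getElem _ _ hk1, List.getD_eq_getElem _ _ hk2] at this

lemma pvCyc_length (l : List Int) (i j : Nat) (hij : i ≤ j) (h : j < l.length) :
    (pvCyc l i j).length = l.length := by
  unfold pvCyc; simp; omega

lemma pvCyc_getD (l : List Int) (i j : Nat) (hij : i ≤ j) (hj : j < l.length) (k : Nat) :
    (pvCyc l i j).getD k 0 =
      if k < i then l.getD k 0
      else if k = i then l.getD j 0
      else if k ≤ j then l.getD (k - 1) 0
      else l.getD k 0 := by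
  rw [pvCyc, List.getD_eq_getElem?_getD]
  by_cases h1 : k < i
  · rw [List.getElem?_append_left (by simp; omega)]
    simp [h1, List.getD_eq_getElem?_getD]
  · rw [List.getElem?_append_right (by simp; omega), List.length_take,
      Nat.min_eq_left (by omega : i ≤ l.length)]
    by_cases h2 : k = i
    · subst h2; simp [h1]
    · have hs : k - i = (k - i - 1) + 1 := by omega
      rw [hs, List.getElem?_cons_succ]
      by_cases h3 : k ≤ j
      · rw [List.getElem?_append_left (by simp; omega)]
        rw [List.getElem?_take_of_lt (by omega), List.getElem?_drop]
        have h4 : i + (k - i - 1) = k - 1 := by omega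
        rw [h4]
        simp [h1, h2, h3, List.getD_eq_getElem?_getD]
      · rw [List.getElem?_append_right (by simp; omega)]
        rw [List.getElem?_drop, List.length_take, List.length_drop]
        have h4 : j + 1 + (k - i - 1 - min (j - i) (l.length - i)) = k := by omega
        rw [h4]
        simp [h1, h2, h3, List.getD_eq_getElem?_getD]

lemma pvSwap2_length (c : List Int) (i : Nat) : (pvSwap2 c i).length = c.length := by
  simp [pvSwap2]

lemma pvSwap2_getD (c : List Int) (i k : Nat) :
    (pvSwap2 c i).getD k 0 =
      if k = i + 1 ∧ k < c.length then c.getD (i + 2) 0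
      else if k = i + 2 ∧ k < c.length then c.getD (i + 1) 0
      else c.getD k 0 := by
  simp only [pvSwap2, pvGetD_set, List.length_set]
  split_ifs <;> first | rfl | omega

lemma pvCyc_self (l : List Int) (i : Nat) (h : i < l.length) : pvCyc l i i = l := by
  unfold pvCyc
  simp only [Nat.sub_self, List.take_zero, List.nil_append]
  rw [List.getD_eq_getElem _ _ h, ← List.drop_eq_getElem_cons h, List.take_append_drop]

lemma pvCyc_rot3 (l : List Int) (i p : Nat) (hip : i ≤ p) (h : p + 2 < l.length) :
    pvCyc (((l.set p (l.getD (p + 2) 0)).set (p + 1) (l.getD p 0)).set (p + 2) (l.getD (p + 1) 0)) i p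
      = pvCyc l i (p + 2) := by
  set l2 := ((l.set p (l.getD (p + 2) 0)).set (p + 1) (l.getD p 0)).set (p + 2)
      (l.getD (p + 1) 0) with hl2
  have hlen2 : l2.length = l.length := by simp [hl2]
  apply pvEq_of_getD
  · rw [pvCyc_length l2 i p hip (by rw [hlen2]; omega), pvCyc_length l i (p + 2) (by omega) h,
      hlen2]
  · intro k
    rw [pvCyc_getD l2 i p hip (by rw [hlen2]; omega) k, pvCyc_getD l i (p + 2) (by omega) h k]
    simp only [hl2, pvGetD_set, List.length_set, eq_self_iff_true, true_and]
    split_ifs <;> first | rfl | omega | (congr 1; omega)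

lemma pvRot_one (l : List Int) (i : Nat) (h : i + 2 < l.length) :
    ((l.set i (l.getD (i + 1) 0)).set (i + 1) (l.getD (i + 2) 0)).set (i + 2) (l.getD i 0)
      = pvSwap2 (pvCyc l i (i + 1)) i := by
  apply pvEq_of_getD
  · rw [pvSwap2_length, pvCyc_length _ _ _ (by omega) (by omega)]; simp
  · intro k
    rw [pvSwap2_getD]
    rw [pvCyc_length _ _ _ (by omega) (by omega)]
    rw [pvCyc_getD l i (i + 1) (by omega) (by omega) (i + 2),
      pvCyc_getD l i (i + 1) (by omega) (by omega) (i + 1),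
      pvCyc_getD l i (i + 1) (by omega) (by omega) k]
    simp only [pvGetD_set, List.length_set, eq_self_iff_true, true_and]
    split_ifs <;> first | rfl | omega | (congr 1; omega)

lemma pvRotDown_eq : ∀ (g : Nat) (l : List Int) (i : Nat), i + g < l.length →
    pvRotDown l i g =
      if g % 2 = 0 then some (pvCyc l i (i + g))
      else if i + 2 ≥ l.length then none
      else some (pvSwap2 (pvCyc l i (i + g)) i) := by
  intro g
  induction g using Nat.twoStepInduction with
  | zero =>
    intro l i h
    simp [pvRotDown, pvCyc_self l i (by omega)]
  | one =>
    intro l i h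
    simp only [pvRotDown]
    rw [if_neg (by omega : ¬ (1 % 2 = 0))]
    split_ifs with h2
    · rfl
    · rw [pvRot_one l i (by omega)]
  | more g ih _ =>
    intro l i h
    simp only [pvRotDown, Nat.add_sub_cancel]
    rw [show i + g + 2 - 1 = i + g + 1 from by omega]
    set l' := ((l.set (i + g) (l.getD (i + g + 2) 0)).set (i + g + 1)
        (l.getD (i + g) 0)).set (i + g + 2) (l.getD (i + g + 1) 0) with hl'
    have hlen : l'.length = l.length := by simp [hl']
    rw [ih l' i (by rw [hlen]; omega)]
    have h2 : i + g + 2 = i + (g + 2) := by omega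
    rw [hl']
    rw [pvCyc_rot3 l i (i + g) (by omega) (by omega)]
    have hmod : (g + 2) % 2 = g % 2 := Nat.add_mod_right g 2
    rw [← h2, hmod]
    simp only [List.length_set]

lemma pvFindJGo_eq (l : List Int) (m : Int) :
    ∀ (f j k : Nat), f = l.length - j → PySem.List.index? (l.drop j) m = some k →
      pvFindJGo l m j f = j + k := by
  intro f
  induction f with
  | zero =>
    intro j k hf hidx
    have : l.drop j = [] := by
      apply List.drop_eq_nil_of_le; omega
    rw [this] at hidx
    simp [PySem.List.index?_eq_idxOf?] at hidx
  | succ f ihf =>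
    intro j k hf hidx
    have hj : j < l.length := by omega
    have hdec : l.drop j = l[j] :: l.drop (j + 1) := List.drop_eq_getElem_cons hj
    rw [hdec] at hidx
    simp only [pvFindJGo]
    by_cases hv : l.getD j 0 = m
    · rw [if_pos hv]
      rw [List.getD_eq_getElem _ _ hj] at hv
      rw [hv, PySem.List.index?_cons_self] at hidx
      simp at hidx
      omega
    · rw [if_neg hv]
      rw [List.getD_eq_getElem _ _ hj] at hv
      rw [PySem.List.index?_cons_of_ne _ hv] at hidx
      rcases hk : PySem.List.index? (l.drop (j + 1)) m with _ | k'
      · rw [hk] at hidx; simp at hidx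
      · rw [hk] at hidx
        simp at hidx
        rw [ihf (j + 1) k' (by omega) hk]
        omega

lemma pvFindJ_eq (l : List Int) (m : Int) (p k : Nat)
    (h : PySem.List.index? (l.drop p) m = some k) : pvFindJ l p m = p + k := by
  unfold pvFindJ
  exact pvFindJGo_eq l m (l.length - p) p k rfl h

lemma pvLoop_eq : ∀ (k : Nat) (l : List Int), pvLoopA l k = pvLoopB l k := by
  intro k
  induction k with
  | zero => intro l; rfl
  | succ k ih =>
    intro l
    simp only [pvLoopA, pvLoopB]
    by_cases hnil : l = []
    · subst hnil
      have hmn : PySem.List.min? ([] : List Int) (fun x => x) = none :=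
        (PySem.List.min?_eq_none_iff _ _).mpr rfl
      simp [hmn, PySem.List.index?_eq_idxOf?, ih]
    · have hi : l.length - (k + 1) < l.length := by
        have : 0 < l.length := List.length_pos_of_ne_nil hnil
        omega
      set i := l.length - (k + 1) with hidef
      have hdnil : l.drop i ≠ [] := by
        intro hd
        have := List.drop_eq_nil_iff.mp hd
        omega
      obtain ⟨m, hm⟩ : ∃ m, PySem.List.min? (l.drop i) (fun x => x) = some m := by
        rcases h : PySem.List.min? (l.drop i) (fun x => x) with _ | m
        · exact absurd ((PySem.List.min?_eq_none_iff _ _).mp h) hdnil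
        · exact ⟨m, rfl⟩
      have hmem : m ∈ l.drop i := PySem.List.min?_mem hm
      obtain ⟨t, ht⟩ : ∃ t, PySem.List.index? (l.drop i) m = some t := by
        have := PySem.List.index?_isSome_iff (xs := l.drop i) (v := m)
        rcases h : PySem.List.index? (l.drop i) m with _ | t
        · rw [h] at this; simp at this; exact absurd hmem this
        · exact ⟨t, rfl⟩
      obtain ⟨hklt, hkv, hfirst⟩ := PySem.List.getElem_of_index?_eq_some ht
      rw [hm]
      simp only [Option.getD_some]
      rw [ht]
      simp only [Option.getD_some]
      have hlen_drop : (l.drop i).length = l.length - i := List.length_drop ..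
      have hdropel : ∀ (s : Nat) (hs : s < (l.drop i).length), (l.drop i)[s] = l[i + s]'(by
          rw [hlen_drop] at hs; omega) := by
        intro s hs; rw [List.getElem_drop]
      by_cases ht0 : t = 0
      · subst ht0
        have hgi : l.getD i 0 = m := by
          rw [List.getD_eq_getElem _ _ hi, ← hkv, hdropel 0 hklt]
          simp
        rw [if_pos hgi, if_pos (by omega : i + 0 = i)]
        exact ih l
      · have hgi : l.getD i 0 ≠ m := by
          rw [List.getD_eq_getElem _ _ hi]
          intro hc
          exact hfirst 0 (by omega) (by rw [hdropel 0 (by omega)]; simpa using hc)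
        rw [if_neg hgi, if_neg (by omega : ¬ i + t = i)]
        -- A's inner scan finds the same index i + t
        have hcons : l.drop i = l[i] :: l.drop (i + 1) := List.drop_eq_getElem_cons hi
        have hne : l[i] ≠ m := by
          intro hc
          exact hfirst 0 (by omega) (by rw [hdropel 0 (by omega)]; simpa using hc)
        have hidx1 : PySem.List.index? (l.drop (i + 1)) m = some (t - 1) := by
          rw [hcons, PySem.List.index?_cons_of_ne _ hne] at ht
          rcases hk2 : PySem.List.index? (l.drop (i + 1)) m with _ | t'
          · rw [hk2] at ht; simp at ht
          · rw [hk2] at ht; simp at ht; simp; omega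
        have hfind : pvFindJ l (i + 1) m = i + t := by
          rw [pvFindJ_eq l m (i + 1) (t - 1) hidx1]; omega
        rw [hfind]
        have htsub : i + t - i = t := by omega
        rw [htsub]
        have htlt : i + t < l.length := by rw [hlen_drop] at hklt; omega
        rw [pvRotDown_eq t l i htlt]
        have hcval : l.getD (i + t) 0 = m := by
          rw [List.getD_eq_getElem _ _ htlt, ← hkv, hdropel t hklt]
        have hcyc : pvCyc l i (i + t)
            = l.take i ++ m :: ((l.drop i).take t ++ l.drop (i + t + 1)) := by
          rw [pvCyc, hcval, Nat.add_sub_cancel_left]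
        by_cases hpar : t % 2 = 1
        · rw [if_neg (by omega), if_pos hpar]
          split_ifs with hbig
          · rfl
          · show pvLoopA (pvSwap2 (pvCyc l i (i + t)) i) k = _
            rw [ih]
            congr 1
            rw [hcyc]
            rfl
        · rw [if_pos (by omega), if_neg hpar]
          show pvLoopA (pvCyc l i (i + t)) k = _
          rw [ih, hcyc]

-- ===== VERDICT (by name: the statement is the Claim_ definition above) =====
theorem cansort_spec : Claim_equal_cansort := by
  intro a _
  unfold Spec_cansort cansort cansort_alt
  exact pvLoop_eq a.length a
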